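-- pv_equiv track=rewrite | github.com/rjherrera/IIC1103 | Labs/L04/4.py | digitear
-- ===== SOURCE A (Python) =====
-- def digitear(x):
--     i=0
--     digitos=[]
--     while x>0:
--         digitos.append(x%10)
--         x//=10
--         i+=1
--     return(digitos)
-- ===== SOURCE B (Python) =====
-- def digitear(x):
--     if x <= 0:
--         return []
--     return [int(c) for c in str(x)][::-1]
-- ===== Notes on version B (the rewrite author's own statement) =====
-- stated objective: idiomatic
-- what changed: B reads the digits off the decimal string representation str(x) and reverses it, instead of A's repeated modulo-and-floor-division loop.
import Mathlib
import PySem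

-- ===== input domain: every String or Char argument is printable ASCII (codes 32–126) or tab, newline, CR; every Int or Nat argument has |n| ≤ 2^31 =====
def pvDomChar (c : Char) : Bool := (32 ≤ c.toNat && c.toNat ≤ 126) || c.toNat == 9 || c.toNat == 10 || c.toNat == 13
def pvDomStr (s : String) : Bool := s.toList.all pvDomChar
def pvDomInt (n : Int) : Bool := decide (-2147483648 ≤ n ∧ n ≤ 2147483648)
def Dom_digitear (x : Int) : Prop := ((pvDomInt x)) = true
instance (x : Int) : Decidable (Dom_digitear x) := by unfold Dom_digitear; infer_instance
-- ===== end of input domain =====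

-- B builds the digit list from the decimal string str(x) and reverses it, instead of A's division loop (objective: idiomatic; return value only, no mutation).

-- ===== PORT A =====
-- the while loop of A: state = (x, i, digitos); terminates because x//10 shrinks x.toNat
def digitearLoop (x : Int) (i : Int) (digitos : List Int) : List Int :=
  if x > 0 then
    digitearLoop (PySem.Int.floordiv x 10) (i + 1) (digitos ++ [PySem.Int.mod x 10])
  else digitos
termination_by x.toNat
decreasing_by
  simp only [PySem.Int.floordiv, Int.fdiv_eq_ediv_of_nonneg _ (by norm_num : (0:Int) ≤ 10)]
  omega

def digitear (x : Int) : List Int := digitearLoop x 0 []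

-- ===== PORT B =====
-- int(c) for a single decimal digit character c is exactly c.toNat - 48; str(x)[::-1] via List.reverse
def digitear_alt (x : Int) : List Int :=
  if x ≤ 0 then []
  else (((PySem.Int.toStr x).toList).map (fun c => ((c.toNat : Int) - 48))).reverse

-- ===== PRECONDITION & SPEC =====
def Spec_digitear (x : Int) (out : List Int) : Prop := out = digitear_alt x
instance (x : Int) (out : List Int) : Decidable (Spec_digitear x out) := by unfold Spec_digitear; infer_instance

-- ===== CLAIM (what is proved, stated in full; the proofs are below) =====
def Claim_equal_digitear : Prop := ∀ (x : Int), Dom_digitear x → Spec_digitear x (digitear x)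

-- ===== LEMMAS AND PROOFS =====

theorem pv_digitChar_val {d : Nat} (hd : d < 10) :
    ((Nat.digitChar d).toNat : Int) - 48 = (d : Int) := by
  interval_cases d <;> decide

-- toDigitsCore with enough fuel produces the base-10 digits, most significant first
theorem pv_toDigitsCore_eq (fuel : Nat) : ∀ (n : Nat) (ds : List Char), 0 < n → n < fuel →
    Nat.toDigitsCore 10 fuel n ds = ((Nat.digits 10 n).reverse.map Nat.digitChar) ++ ds := by
  induction fuel with
  | zero => intro n ds hn hf; omega
  | succ f ih =>
    intro n ds hn hf
    rw [Nat.toDigitsCore]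
    rw [Nat.digits_def' (by norm_num : 1 < 10) hn]
    by_cases h0 : n / 10 = 0
    · rw [if_pos h0, h0]
      simp
    · rw [if_neg h0, ih (n / 10) _ (Nat.pos_of_ne_zero h0) (by omega)]
      simp

theorem pv_toDigits_eq {n : Nat} (hn : 0 < n) :
    Nat.toDigits 10 n = (Nat.digits 10 n).reverse.map Nat.digitChar := by
  rw [Nat.toDigits, pv_toDigitsCore_eq (n + 1) n [] hn (by omega)]
  simp

theorem pv_alt_pos {n : Nat} (hn : 0 < n) :
    digitear_alt (n : Int) = (Nat.digits 10 n).map (fun d : Nat => (d : Int)) := by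
  rw [digitear_alt, if_neg (by omega)]
  rw [PySem.Int.toStr]
  simp only [PySem.Int.toChars, String.toList_ofList]
  rw [if_neg (by omega), Int.toNat_natCast, pv_toDigits_eq hn]
  rw [List.map_map, List.map_reverse, List.reverse_reverse]
  exact List.map_congr_left fun d hd =>
    pv_digitChar_val (Nat.digits_lt_base (by norm_num) hd)

theorem pv_loop_eq (n : Nat) : ∀ (i : Int) (acc : List Int),
    digitearLoop (n : Int) i acc = acc ++ (Nat.digits 10 n).map (fun d : Nat => (d : Int)) := by
  induction n using Nat.strong_induction_on with
  | _ n ih =>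
    intro i acc
    rw [show ∀ a b c, digitearLoop a b c = if a > 0 then digitearLoop (PySem.Int.floordiv a 10) (b+1) (c ++ [PySem.Int.mod a 10]) else c from fun a b c => by rw [digitearLoop]]
    by_cases hn : 0 < n
    · rw [if_pos (by exact_mod_cast hn)]
      have hdiv : PySem.Int.floordiv (n : Int) 10 = ((n / 10 : Nat) : Int) := by
        simp [PySem.Int.floordiv, Int.fdiv_eq_ediv_of_nonneg _ (by norm_num : (0:Int) ≤ 10)]
      have hmod : PySem.Int.mod (n : Int) 10 = ((n % 10 : Nat) : Int) := by
        simp [PySem.Int.mod, Int.fmod_eq_emod]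
      rw [hdiv, hmod, ih (n / 10) (Nat.div_lt_self hn (by norm_num))]
      rw [Nat.digits_def' (by norm_num : 1 < 10) hn]
      simp
    · rw [if_neg (by exact_mod_cast hn)]
      have : n = 0 := by omega
      simp [this]

-- ===== VERDICT (by name: the statement is the Claim_ definition above) =====
theorem digitear_spec : Claim_equal_digitear := by
  intro x _
  unfold Spec_digitear digitear
  by_cases hx : 0 < x
  · have hxe : x = ((x.toNat : Nat) : Int) := by omega
    rw [hxe, pv_loop_eq, pv_alt_pos (by omega)]
    simp
  · rw [digitearLoop.eq_def, if_neg hx, digitear_alt, if_pos (by omega)]
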